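-- pv_equiv track=rewrite | github.com/zhang682502-ui/trend_agent | tools/report_summarizer.py | _split_report_items
-- ===== SOURCE A (Python) =====
-- def _split_report_items(report_text: str) -> list[str]:
--     lines = (report_text or "").splitlines()
--     items: list[str] = []
--     current: list[str] = []
--     for line in lines:
--         if line.startswith("Title:") and current:
--             items.append("\n".join(current).strip())
--             current = [line]
--         else:
--             current.append(line)
--     if current:
--         items.append("\n".join(current).strip())
--     items = [item for item in items if item]
--     if not items and (report_text or "").strip():
--         return [(report_text or "").strip()]
--     return items
-- ===== SOURCE B (Python) =====
-- def _split_report_items(report_text: str) -> list[str]: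
--     text = report_text or ""
--     items = ["\n".join(seg).strip() for seg in _segments(text.splitlines())]
--     items = [item for item in items if item]
--     if items:
--         return items
--     stripped = text.strip()
--     return [stripped] if stripped else []
--
--
-- def _segments(lines: list[str]) -> list[list[str]]:
--     # Cut lines into maximal segments, each new segment opened by a
--     # "Title:" line (the first segment starts at line 0 unconditionally).
--     segs: list[list[str]] = []
--     while lines:
--         rest = lines[1:]
--         k = 0
--         while k < len(rest) and not rest[k].startswith("Title:"):
--             k += 1
--         segs.append([lines[0]] + rest[:k])
--         lines = rest[k:]
--     return segs
-- ===== Notes on version B (the rewrite author's own statement) =====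
-- stated objective: alternative
-- what changed: The buffering accumulator loop (current list flushed into items at each Title: line) is replaced by an explicit segmentation pass that repeatedly scans for the next Title: boundary and slices off one whole segment, followed by a map of join+strip over the segments.
import Mathlib
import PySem

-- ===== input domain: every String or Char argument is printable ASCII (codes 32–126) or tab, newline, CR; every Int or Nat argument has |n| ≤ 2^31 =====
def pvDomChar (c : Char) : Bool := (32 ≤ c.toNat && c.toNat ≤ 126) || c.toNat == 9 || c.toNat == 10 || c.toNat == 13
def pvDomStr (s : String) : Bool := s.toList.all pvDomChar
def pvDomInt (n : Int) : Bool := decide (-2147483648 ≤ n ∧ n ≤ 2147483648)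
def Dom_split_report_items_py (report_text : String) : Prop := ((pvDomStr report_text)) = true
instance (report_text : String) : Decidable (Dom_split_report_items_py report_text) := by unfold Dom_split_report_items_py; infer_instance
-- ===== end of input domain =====

-- B replaces A's flush-on-boundary buffering loop by an explicit segmentation
-- (scan to the next "Title:" boundary, slice off one segment, repeat) followed
-- by a map of join+strip; same cost, alternative decomposition.

-- ===== PORT A =====
-- the loop body: flush `current` into `items` on a "Title:" line, else buffer
def pvStepA (st : List String × List String) (line : String) : List String × List String :=
  if PySem.Str.startswith line "Title:" && !st.2.isEmpty then
    (st.1 ++ [PySem.Str.strip (PySem.Str.join "\n" st.2)], [line])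
  else
    (st.1, st.2 ++ [line])

def split_report_items_py (report_text : String) : List String :=
  let lines := PySem.Str.splitlines report_text
  let st := lines.foldl pvStepA ([], [])
  let items0 := if st.2.isEmpty then st.1
                else st.1 ++ [PySem.Str.strip (PySem.Str.join "\n" st.2)]
  let items := items0.filter (fun item => item != "")
  if items.isEmpty && (PySem.Str.strip report_text != "") then
    [PySem.Str.strip report_text]
  else items

-- ===== PORT B =====
def pvIsTitle (line : String) : Bool := PySem.Str.startswith line "Title:"

-- the inner while loop of _segments: length of the non-"Title:" prefix
def pvCountNonTitle : List String → Nat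
  | [] => 0
  | l :: ls => if pvIsTitle l then 0 else pvCountNonTitle ls + 1

-- the outer while loop of _segments: slice off one segment, recurse on the rest
def pvSegLoop (segs : List (List String)) : List String → List (List String)
  | [] => segs
  | h :: rest =>
    let k := pvCountNonTitle rest
    pvSegLoop (segs ++ [h :: rest.take k]) (rest.drop k)
  termination_by ls => ls.length
  decreasing_by simp

def split_report_items_py_alt (report_text : String) : List String :=
  let items0 := (pvSegLoop [] (PySem.Str.splitlines report_text)).map
      (fun seg => PySem.Str.strip (PySem.Str.join "\n" seg))
  let items := items0.filter (fun item => item != "")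
  if !items.isEmpty then items
  else
    let stripped := PySem.Str.strip report_text
    if stripped != "" then [stripped] else []

-- ===== PRECONDITION & SPEC =====
def Spec_split_report_items_py (report_text : String) (out : List String) : Prop := out = split_report_items_py_alt report_text
instance (report_text : String) (out : List String) : Decidable (Spec_split_report_items_py report_text out) := by unfold Spec_split_report_items_py; infer_instance

-- ===== CLAIM (what is proved, stated in full; the proofs are below) =====
def Claim_equal_split_report_items_py : Prop := ∀ (report_text : String), Dom_split_report_items_py report_text → Spec_split_report_items_py report_text (split_report_items_py report_text)

-- ===== LEMMAS AND PROOFS =====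

lemma pvSegLoop_append : ∀ (n : Nat) (ls : List String), ls.length ≤ n →
    ∀ segs, pvSegLoop segs ls = segs ++ pvSegLoop [] ls := by
  intro n
  induction n with
  | zero =>
    intro ls h segs
    cases ls with
    | nil => simp [pvSegLoop]
    | cons a l => simp at h
  | succ n ih =>
    intro ls h segs
    cases ls with
    | nil => simp [pvSegLoop]
    | cons hd rest =>
      rw [pvSegLoop, pvSegLoop]
      have hlen : (rest.drop (pvCountNonTitle rest)).length ≤ n := by
        simp at h ⊢; omega
      rw [ih _ hlen, ih _ hlen ([] ++ _)]
      simp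

lemma pvSegLoop_cons (hd : String) (rest : List String) :
    pvSegLoop [] (hd :: rest)
      = (hd :: rest.take (pvCountNonTitle rest))
          :: pvSegLoop [] (rest.drop (pvCountNonTitle rest)) := by
  rw [pvSegLoop, pvSegLoop_append (rest.drop (pvCountNonTitle rest)).length _ le_rfl]
  simp

lemma pv_fold_main : ∀ (ls cur its : List String), cur ≠ [] →
    (let st := ls.foldl pvStepA (its, cur)
     if st.2.isEmpty then st.1
     else st.1 ++ [PySem.Str.strip (PySem.Str.join "\n" st.2)])
    = its ++ (((cur ++ ls.take (pvCountNonTitle ls))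
                 :: pvSegLoop [] (ls.drop (pvCountNonTitle ls))).map
        (fun seg => PySem.Str.strip (PySem.Str.join "\n" seg))) := by
  intro ls
  induction ls with
  | nil =>
    intro cur its hcur
    simp [pvCountNonTitle, pvSegLoop, hcur]
  | cons l ls' ih =>
    intro cur its hcur
    have hcurE : cur.isEmpty = false := by simp [hcur]
    cases hT : pvIsTitle l with
    | true =>
      have hT' : PySem.Str.startswith l "Title:" = true := hT
      have hstep : pvStepA (its, cur) l
          = (its ++ [PySem.Str.strip (PySem.Str.join "\n" cur)], [l]) := by
        simp only [pvStepA]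
        rw [hT']
        simp [hcurE]
      simp only [List.foldl_cons, hstep]
      rw [ih [l] _ (by simp)]
      simp [pvCountNonTitle, hT, pvSegLoop_cons]
    | false =>
      have hT' : PySem.Str.startswith l "Title:" = false := hT
      have hstep : pvStepA (its, cur) l = (its, cur ++ [l]) := by
        simp only [pvStepA]
        rw [hT']
        simp
      simp only [List.foldl_cons, hstep]
      rw [ih (cur ++ [l]) _ (by simp)]
      simp [pvCountNonTitle, hT]

lemma pv_items_eq (report_text : String) :
    (let st := (PySem.Str.splitlines report_text).foldl pvStepA ([], [])
     if st.2.isEmpty then st.1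
     else st.1 ++ [PySem.Str.strip (PySem.Str.join "\n" st.2)])
    = (pvSegLoop [] (PySem.Str.splitlines report_text)).map
        (fun seg => PySem.Str.strip (PySem.Str.join "\n" seg)) := by
  cases hl : PySem.Str.splitlines report_text with
  | nil => simp [pvSegLoop]
  | cons l ls' =>
    have hstep : pvStepA ([], []) l = ([], [l]) := by
      simp [pvStepA]
    simp only [List.foldl_cons, hstep]
    rw [pv_fold_main ls' [l] [] (by simp)]
    rw [pvSegLoop_cons]
    simp

lemma pv_AB (report_text : String) :
    split_report_items_py report_text = split_report_items_py_alt report_text := by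
  unfold split_report_items_py split_report_items_py_alt
  dsimp only
  rw [pv_items_eq report_text]
  set items := ((pvSegLoop [] (PySem.Str.splitlines report_text)).map
      (fun seg => PySem.Str.strip (PySem.Str.join "\n" seg))).filter
      (fun item => item != "") with hitems
  by_cases he : items.isEmpty
  · rw [List.isEmpty_iff.mp he]
    by_cases hs : PySem.Str.strip report_text = ""
    · simp [hs]
    · simp [hs]
  · simp [he]

-- ===== VERDICT (by name: the statement is the Claim_ definition above) =====
theorem split_report_items_py_spec : Claim_equal_split_report_items_py := by
  intro report_text _
  unfold Spec_split_report_items_py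
  exact pv_AB report_text
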